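-- pv_equiv track=rewrite | github.com/spiffycoffee/fivetribes-ai | fivetribes.py | _gen_routes
-- ===== SOURCE A (Python) =====
-- def _gen_routes(n, prev_dir, curr_idx, route, board_info):
--     if n <= 0:
--         # FIXME hack to prevent a route from starting and stopping on same tile
--         return [route] if route[-1] != route[0] else []
--         #return [route]
--
--     n_rows = board_info[1]
--     n_cols = board_info[2]
--     result = []
--     # if not top row
--     if curr_idx >= n_cols and prev_dir != 'S' :
--         next_idx = curr_idx - n_cols
--         # move up
--         result += _gen_routes(n-1, 'N', next_idx, route+[next_idx], board_info)
--     # if not right column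
--     if curr_idx % n_cols < n_cols-1 and prev_dir != 'W':
--         next_idx = curr_idx + 1
--         # move right
--         result += _gen_routes(n-1, 'E', next_idx, route+[next_idx], board_info)
--     # if not bottom row
--     if curr_idx < (n_rows-1) * n_cols and prev_dir != 'N':
--         next_idx = curr_idx + n_cols
--         # move down
--         result += _gen_routes(n-1, 'S', next_idx, route+[next_idx], board_info)
--     # if not left column
--     if curr_idx % n_cols != 0 and prev_dir != 'E':
--         next_idx = curr_idx - 1
--         # move left
--         result += _gen_routes(n-1, 'W', next_idx, route+[next_idx], board_info)
--     return result
-- ===== SOURCE B (Python) =====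
-- def _gen_routes(n, prev_dir, curr_idx, route, board_info):
--     # Level-synchronous (breadth-first) frontier expansion instead of recursion;
--     # children are generated in the same N,E,S,W priority order, so the final
--     # list order matches the recursive depth-first enumeration exactly.
--     frontier = [(prev_dir, curr_idx, route)]
--     steps = n
--     while steps > 0:
--         n_rows = board_info[1]
--         n_cols = board_info[2]
--         new_frontier = []
--         for (d, i, r) in frontier:
--             if i >= n_cols and d != 'S':
--                 new_frontier.append(('N', i - n_cols, r + [i - n_cols]))
--             if i % n_cols < n_cols - 1 and d != 'W':
--                 new_frontier.append(('E', i + 1, r + [i + 1]))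
--             if i < (n_rows - 1) * n_cols and d != 'N':
--                 new_frontier.append(('S', i + n_cols, r + [i + n_cols]))
--             if i % n_cols != 0 and d != 'E':
--                 new_frontier.append(('W', i - 1, r + [i - 1]))
--         frontier = new_frontier
--         steps -= 1
--     return [r for (_, _, r) in frontier if r[-1] != r[0]]
-- ===== Notes on version B (the rewrite author's own statement) =====
-- stated objective: alternative
-- what changed: Replaced the depth-first recursion by an iterative level-synchronous frontier expansion (each round expands every partial route one step in the same N,E,S,W priority order, then a final filter), which yields the same routes in the same order without recursion.
-- outside the precondition, e.g. on _gen_routes(0, 'N', 0, [], [9, 2, 2]): A raises IndexError, B raises IndexError; on _gen_routes(1, 'N', 0, [0], [9, 2]): A raises IndexError, B raises IndexError; on _gen_routes(1, 'N', 0, [0], [9, 2, 0]): A raises ZeroDivisionError, B raises ZeroDivisionError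
import Mathlib
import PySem

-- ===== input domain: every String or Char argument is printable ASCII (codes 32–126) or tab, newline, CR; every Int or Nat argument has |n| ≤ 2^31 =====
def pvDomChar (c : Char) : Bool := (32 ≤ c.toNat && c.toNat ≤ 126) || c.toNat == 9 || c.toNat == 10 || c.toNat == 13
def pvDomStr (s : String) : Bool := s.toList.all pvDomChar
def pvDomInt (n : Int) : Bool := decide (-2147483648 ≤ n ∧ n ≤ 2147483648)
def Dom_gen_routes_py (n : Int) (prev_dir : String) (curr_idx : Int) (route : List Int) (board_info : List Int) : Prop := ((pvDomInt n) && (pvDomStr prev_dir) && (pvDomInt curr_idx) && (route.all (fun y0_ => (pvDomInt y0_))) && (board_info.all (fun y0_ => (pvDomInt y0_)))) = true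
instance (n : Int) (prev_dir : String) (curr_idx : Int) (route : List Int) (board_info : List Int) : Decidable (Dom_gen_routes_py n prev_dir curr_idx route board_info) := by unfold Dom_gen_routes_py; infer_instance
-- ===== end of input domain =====

-- B replaces the depth-first recursion by a level-synchronous frontier iteration
-- (expand all partial routes one step per round, in the same N,E,S,W priority
-- order, then filter); objective: alternative decomposition, same output order.

-- ===== PORT A =====
-- literal transliteration of the recursive _gen_routes
def gen_routes_py (n : Int) (prev_dir : String) (curr_idx : Int) (route : List Int) (board_info : List Int) : List (List Int) :=
  if n ≤ 0 then
    if PySem.List.pyGet? route (-1) ≠ PySem.List.pyGet? route 0 then [route] else []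
  else
    let n_rows := PySem.List.pyGetD board_info 1 0
    let n_cols := PySem.List.pyGetD board_info 2 0
    let r1 : List (List Int) :=
      if curr_idx ≥ n_cols ∧ prev_dir ≠ "S" then
        gen_routes_py (n-1) "N" (curr_idx - n_cols) (route ++ [curr_idx - n_cols]) board_info
      else []
    let r2 : List (List Int) :=
      if PySem.Int.mod curr_idx n_cols < n_cols - 1 ∧ prev_dir ≠ "W" then
        gen_routes_py (n-1) "E" (curr_idx + 1) (route ++ [curr_idx + 1]) board_info
      else []
    let r3 : List (List Int) :=
      if curr_idx < (n_rows - 1) * n_cols ∧ prev_dir ≠ "N" then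
        gen_routes_py (n-1) "S" (curr_idx + n_cols) (route ++ [curr_idx + n_cols]) board_info
      else []
    let r4 : List (List Int) :=
      if PySem.Int.mod curr_idx n_cols ≠ 0 ∧ prev_dir ≠ "E" then
        gen_routes_py (n-1) "W" (curr_idx - 1) (route ++ [curr_idx - 1]) board_info
      else []
    r1 ++ r2 ++ r3 ++ r4
termination_by n.toNat
decreasing_by all_goals omega

-- ===== PORT B =====
-- one-step expansion of a single frontier state, children in N,E,S,W order (B's inner loop body)
def pvExpand (board_info : List Int) (s : String × Int × List Int) : List (String × Int × List Int) :=
  let n_rows := PySem.List.pyGetD board_info 1 0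
  let n_cols := PySem.List.pyGetD board_info 2 0
  (if s.2.1 ≥ n_cols ∧ s.1 ≠ "S" then [("N", s.2.1 - n_cols, s.2.2 ++ [s.2.1 - n_cols])] else []) ++
  (if PySem.Int.mod s.2.1 n_cols < n_cols - 1 ∧ s.1 ≠ "W" then [("E", s.2.1 + 1, s.2.2 ++ [s.2.1 + 1])] else []) ++
  (if s.2.1 < (n_rows - 1) * n_cols ∧ s.1 ≠ "N" then [("S", s.2.1 + n_cols, s.2.2 ++ [s.2.1 + n_cols])] else []) ++
  (if PySem.Int.mod s.2.1 n_cols ≠ 0 ∧ s.1 ≠ "E" then [("W", s.2.1 - 1, s.2.2 ++ [s.2.1 - 1])] else [])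

-- one round of B's while loop: expand the whole frontier
def pvStep (board_info : List Int) (frontier : List (String × Int × List Int)) : List (String × Int × List Int) :=
  frontier.flatMap (pvExpand board_info)

-- B's final list comprehension
def pvFinish (frontier : List (String × Int × List Int)) : List (List Int) :=
  (frontier.filter (fun s => PySem.List.pyGet? s.2.2 (-1) != PySem.List.pyGet? s.2.2 0)).map (fun s => s.2.2)

def gen_routes_py_alt (n : Int) (prev_dir : String) (curr_idx : Int) (route : List Int) (board_info : List Int) : List (List Int) :=
  pvFinish ((pvStep board_info)^[n.toNat] [(prev_dir, curr_idx, route)])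

-- ===== PRECONDITION & SPEC =====
-- Pre_ excludes exactly the inputs where the Python raises: an empty route with
-- n ≤ 0 (IndexError on route[-1]) and, when n > 0, a board_info shorter than 3
-- (IndexError) or with n_cols = board_info[2] = 0 (ZeroDivisionError on %).
def Pre_gen_routes_py (n : Int) (prev_dir : String) (curr_idx : Int) (route : List Int) (board_info : List Int) : Prop :=
  (n ≤ 0 → route ≠ []) ∧ (0 < n → 3 ≤ board_info.length ∧ board_info.getD 2 0 ≠ 0)
instance (n : Int) (prev_dir : String) (curr_idx : Int) (route : List Int) (board_info : List Int) : Decidable (Pre_gen_routes_py n prev_dir curr_idx route board_info) := by unfold Pre_gen_routes_py; infer_instance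
def pvWitness_gen_routes_py : Int × String × Int × List Int × List Int := (2, "X", 0, [0], [9, 2, 2])

def Spec_gen_routes_py (n : Int) (prev_dir : String) (curr_idx : Int) (route : List Int) (board_info : List Int) (out : List (List Int)) : Prop := out = gen_routes_py_alt n prev_dir curr_idx route board_info
instance (n : Int) (prev_dir : String) (curr_idx : Int) (route : List Int) (board_info : List Int) (out : List (List Int)) : Decidable (Spec_gen_routes_py n prev_dir curr_idx route board_info out) := by unfold Spec_gen_routes_py; infer_instance

-- ===== CLAIM (what is proved, stated in full; the proofs are below) =====
def Claim_equal_gen_routes_py : Prop := ∀ (n : Int) (prev_dir : String) (curr_idx : Int) (route : List Int) (board_info : List Int), Dom_gen_routes_py n prev_dir curr_idx route board_info → Pre_gen_routes_py n prev_dir curr_idx route board_info → Spec_gen_routes_py n prev_dir curr_idx route board_info (gen_routes_py n prev_dir curr_idx route board_info)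

-- ===== LEMMAS AND PROOFS =====

-- depth 0: finishing a frontier is flatMapping A's leaf case over it
theorem pvFinish_eq_flatMap (frontier : List (String × Int × List Int)) (board_info : List Int) :
    pvFinish frontier = frontier.flatMap (fun s => gen_routes_py 0 s.1 s.2.1 s.2.2 board_info) := by
  induction frontier with
  | nil => rfl
  | cons s rest ih =>
    simp only [pvFinish, List.filter_cons, List.flatMap_cons] at *
    rw [gen_routes_py]
    by_cases h : PySem.List.pyGet? s.2.2 (-1) = PySem.List.pyGet? s.2.2 0 <;>
      simp [h, ih]

-- step case: A at n = k+1 is the concatenation of A at k over the expanded children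
theorem gen_routes_succ (k : Nat) (prev_dir : String) (curr_idx : Int) (route : List Int) (board_info : List Int) :
    gen_routes_py ((k : Int) + 1) prev_dir curr_idx route board_info =
      (pvExpand board_info (prev_dir, curr_idx, route)).flatMap
        (fun s => gen_routes_py (k : Int) s.1 s.2.1 s.2.2 board_info) := by
  rw [gen_routes_py]
  have hk : ¬ ((k : Int) + 1 ≤ 0) := by omega
  have hk1 : (k : Int) + 1 - 1 = (k : Int) := by ring
  simp only [hk, if_false, hk1, pvExpand]
  split_ifs <;> simp

-- the frontier invariant: finishing after k rounds equals flatMapping A at depth k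
theorem pvKey (k : Nat) (board_info : List Int) : ∀ (frontier : List (String × Int × List Int)),
    pvFinish ((pvStep board_info)^[k] frontier) =
      frontier.flatMap (fun s => gen_routes_py (k : Int) s.1 s.2.1 s.2.2 board_info) := by
  induction k with
  | zero => intro frontier; simpa using pvFinish_eq_flatMap frontier board_info
  | succ k ih =>
    intro frontier
    rw [Function.iterate_succ_apply, ih, pvStep, List.flatMap_assoc]
    refine List.flatMap_congr (fun s _ => ?_)
    push_cast
    exact (gen_routes_succ k s.1 s.2.1 s.2.2 board_info).symm

-- for n ≤ 0 the first branch ignores everything but route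
theorem gen_routes_nonpos (n : Int) (hn : n ≤ 0) (prev_dir : String) (curr_idx : Int) (route : List Int) (board_info : List Int) :
    gen_routes_py n prev_dir curr_idx route board_info = gen_routes_py 0 prev_dir curr_idx route board_info := by
  conv_lhs => rw [gen_routes_py]
  conv_rhs => rw [gen_routes_py]
  simp [hn]

-- ===== VERDICT (by name: the statement is the Claim_ definition above) =====
theorem gen_routes_py_spec : Claim_equal_gen_routes_py := by
  intro n prev_dir curr_idx route board_info _ _
  show gen_routes_py n prev_dir curr_idx route board_info = gen_routes_py_alt n prev_dir curr_idx route board_info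
  rw [gen_routes_py_alt, pvKey n.toNat board_info [(prev_dir, curr_idx, route)]]
  simp only [List.flatMap_cons, List.flatMap_nil, List.append_nil]
  by_cases hn : n ≤ 0
  · have : n.toNat = 0 := by omega
    rw [this, gen_routes_nonpos n hn]
    rfl
  · congr 1
    omega
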